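-- pv_equiv track=rewrite | github.com/LOLOlogo/etel | crearinforme.py | simplificar_detalles
-- ===== SOURCE A (Python) =====
-- def simplificar_detalles(morfologia, pos):
--     """
--     Simplifica y traduce los atributos morfosintácticos a un lenguaje sencillo,
--     organizando la información en el orden requerido para que cualquier persona (incluso un niño)
--     pueda entenderla.
--
--     Para verbos (pos en ["VERB", "AUX"]):
--       Orden deseado:
--          [VerbForm] [Mood]; [Tense] (si existe); [Person] [Number]
--       Ejemplo: si se tiene {"VerbForm": "Fin", "Mood": "Imp", "Tense": "Pres", "Person": "3", "Number": "Sing"}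
--          se mostrará: "conjugado imperativo; presente; 3ª persona singular"
--
--     Para determinantes (pos == "DET"):
--       Orden deseado:
--          [PronType] [Definite]; [Gender]; [Number]
--       Ejemplo: si se tiene {"PronType": "Art", "Definite": "Ind", "Gender": "Masc", "Number": "Sing"}
--          se mostrará: "artículo indefinido; masculino; singular"
--
--     Para otros tipos se muestra en un orden genérico.
--
--     :param morfologia: Diccionario con atributos morfosintácticos.
--     :param pos: Etiqueta gramatical del token (por ejemplo, "VERB", "DET").
--     :return: Cadena con los valores simplificados y organizados.
--     """
--     # Diccionario de traducciones para los valores: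
--     traducciones = {
--         "Mood": {"Ind": "indicativo", "Subj": "subjuntivo", "Imp": "imperativo"},
--         "Number": {"Sing": "singular", "Plur": "plural"},
--         "Tense": {"Past": "pasado", "Pres": "presente", "Fut": "futuro"},
--         "VerbForm": {"Fin": "conjugado", "Inf": "infinitivo", "Part": "participio"},
--         "Definite": {"Def": "definido", "Ind": "indefinido"},
--         "PronType": {"Art": "artículo", "Prs": "pronombre"},
--         "Gender": {"Masc": "masculino", "Fem": "femenino"},
--         "Person": {"1": "1ª persona", "2": "2ª persona", "3": "3ª persona"},
--         "Reflex": {"Yes": "sí", "No": "no"}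
--     }
--
--     if pos in ["VERB", "AUX"]:
--         verbform = traducciones["VerbForm"].get(morfologia.get("VerbForm", ""), morfologia.get("VerbForm", ""))
--         mood = traducciones["Mood"].get(morfologia.get("Mood", ""), morfologia.get("Mood", ""))
--         tense = traducciones["Tense"].get(morfologia.get("Tense", ""), morfologia.get("Tense", ""))
--         person = traducciones["Person"].get(morfologia.get("Person", ""), morfologia.get("Person", ""))
--         number = traducciones["Number"].get(morfologia.get("Number", ""), morfologia.get("Number", ""))
--         result = verbform
--         if mood:
--             result += " " + mood
--         if tense:
--             result += "; " + tense
--         if person and number: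
--             result += "; " + person + " " + number
--         elif person:
--             result += "; " + person
--         elif number:
--             result += "; " + number
--         return result
--
--     elif pos == "DET":
--         pronType = traducciones["PronType"].get(morfologia.get("PronType", ""), morfologia.get("PronType", ""))
--         definite = traducciones["Definite"].get(morfologia.get("Definite", ""), morfologia.get("Definite", ""))
--         gender = traducciones["Gender"].get(morfologia.get("Gender", ""), morfologia.get("Gender", ""))
--         number = traducciones["Number"].get(morfologia.get("Number", ""), morfologia.get("Number", ""))
--         result = ""
--         if pronType and definite:
--             result += pronType + " " + definite
--         elif pronType:
--             result += pronType
--         elif definite: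
--             result += definite
--         if gender:
--             result += "; " + gender
--         if number:
--             result += "; " + number
--         return result
--
--     else:
--         order = ["VerbForm", "Mood", "Tense", "Number", "Gender", "Definite", "PronType", "Person", "Reflex"]
--         parts = []
--         for key in order:
--             if key in morfologia:
--                 parts.append(traducciones.get(key, {}).get(morfologia[key], morfologia[key]))
--         return "; ".join(parts)
-- ===== SOURCE B (Python) =====
-- def simplificar_detalles(morfologia, pos):
--     """Same translation table as A, but the per-POS layout is data: a list of
--     segment groups of (key, always_keep) pairs fed to one generic assembler."""
--     traducciones = {
--         "Mood": {"Ind": "indicativo", "Subj": "subjuntivo", "Imp": "imperativo"},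
--         "Number": {"Sing": "singular", "Plur": "plural"},
--         "Tense": {"Past": "pasado", "Pres": "presente", "Fut": "futuro"},
--         "VerbForm": {"Fin": "conjugado", "Inf": "infinitivo", "Part": "participio"},
--         "Definite": {"Def": "definido", "Ind": "indefinido"},
--         "PronType": {"Art": "artículo", "Prs": "pronombre"},
--         "Gender": {"Masc": "masculino", "Fem": "femenino"},
--         "Person": {"1": "1ª persona", "2": "2ª persona", "3": "3ª persona"},
--         "Reflex": {"Yes": "sí", "No": "no"}
--     }
--
--     def tr(key):
--         v = morfologia.get(key, "")
--         return traducciones.get(key, {}).get(v, v)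
--
--     if pos in ("VERB", "AUX"):
--         groups = [[("VerbForm", True), ("Mood", False)],
--                   [("Tense", False)],
--                   [("Person", False), ("Number", False)]]
--     elif pos == "DET":
--         groups = [[("PronType", False), ("Definite", False)],
--                   [("Gender", False)],
--                   [("Number", False)]]
--     else:
--         order = ["VerbForm", "Mood", "Tense", "Number", "Gender",
--                  "Definite", "PronType", "Person", "Reflex"]
--         return "; ".join(traducciones.get(k, {}).get(morfologia[k], morfologia[k])
--                          for k in order if k in morfologia)
--
--     out = []
--     for i, group in enumerate(groups):
--         toks = []
--         for key, always in group:
--             t = tr(key)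
--             if always or t:
--                 toks.append(t)
--         if i == 0 or toks:
--             out.append(" ".join(toks))
--     return "; ".join(out)
-- ===== Notes on version B (the rewrite author's own statement) =====
-- stated objective: simpler
-- what changed: Replaces the three hand-written branch bodies (repeated lookup variables and if/elif concatenation chains) by per-POS 'segment group' data of (key, always_keep) pairs fed to one generic assembler loop that joins kept tokens with ' ' and non-empty groups (plus the anchor first group) with '; '.
import Mathlib
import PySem

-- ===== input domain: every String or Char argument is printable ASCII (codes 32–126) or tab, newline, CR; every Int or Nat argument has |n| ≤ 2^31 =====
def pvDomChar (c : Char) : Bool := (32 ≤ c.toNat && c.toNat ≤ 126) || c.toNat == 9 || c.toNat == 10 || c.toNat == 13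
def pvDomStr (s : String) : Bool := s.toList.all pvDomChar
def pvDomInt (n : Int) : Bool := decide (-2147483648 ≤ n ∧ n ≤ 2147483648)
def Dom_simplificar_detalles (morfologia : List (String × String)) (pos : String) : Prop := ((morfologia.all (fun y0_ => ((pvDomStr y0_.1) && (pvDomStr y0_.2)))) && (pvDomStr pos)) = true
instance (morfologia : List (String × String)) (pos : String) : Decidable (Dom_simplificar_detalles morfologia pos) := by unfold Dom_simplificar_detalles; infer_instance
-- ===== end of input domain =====

-- B keeps A's translation table but replaces the three hand-written branch bodies by one
-- generic assembler driven by per-POS "segment group" data (objective: simpler decomposition).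


-- dict.get(k, dflt) on an association list (lookup = first match), shared dict primitive
def pvGetD (d : List (String × String)) (k dflt : String) : String :=
  match d.find? (fun p => p.1 == k) with
  | some p => p.2
  | none => dflt

-- the literal 'traducciones' table of both Pythons: pvTrad cat = traducciones.get(cat, {})
-- (every cat the code looks up directly is present, so this also serves traducciones[cat])
def pvTrad (cat : String) : List (String × String) :=
  if cat = "Mood" then [("Ind", "indicativo"), ("Subj", "subjuntivo"), ("Imp", "imperativo")]
  else if cat = "Number" then [("Sing", "singular"), ("Plur", "plural")]
  else if cat = "Tense" then [("Past", "pasado"), ("Pres", "presente"), ("Fut", "futuro")]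
  else if cat = "VerbForm" then [("Fin", "conjugado"), ("Inf", "infinitivo"), ("Part", "participio")]
  else if cat = "Definite" then [("Def", "definido"), ("Ind", "indefinido")]
  else if cat = "PronType" then [("Art", "artículo"), ("Prs", "pronombre")]
  else if cat = "Gender" then [("Masc", "masculino"), ("Fem", "femenino")]
  else if cat = "Person" then [("1", "1ª persona"), ("2", "2ª persona"), ("3", "3ª persona")]
  else if cat = "Reflex" then [("Yes", "sí"), ("No", "no")]
  else []

-- ===== PORT A =====
def simplificar_detalles (morfologia : List (String × String)) (pos : String) : String :=
  if pos = "VERB" ∨ pos = "AUX" then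
    let verbform := pvGetD (pvTrad "VerbForm") (pvGetD morfologia "VerbForm" "") (pvGetD morfologia "VerbForm" "")
    let mood := pvGetD (pvTrad "Mood") (pvGetD morfologia "Mood" "") (pvGetD morfologia "Mood" "")
    let tense := pvGetD (pvTrad "Tense") (pvGetD morfologia "Tense" "") (pvGetD morfologia "Tense" "")
    let person := pvGetD (pvTrad "Person") (pvGetD morfologia "Person" "") (pvGetD morfologia "Person" "")
    let number := pvGetD (pvTrad "Number") (pvGetD morfologia "Number" "") (pvGetD morfologia "Number" "")
    let result := verbform
    let result := if mood ≠ "" then result ++ " " ++ mood else result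
    let result := if tense ≠ "" then result ++ "; " ++ tense else result
    let result :=
      if person ≠ "" ∧ number ≠ "" then result ++ "; " ++ person ++ " " ++ number
      else if person ≠ "" then result ++ "; " ++ person
      else if number ≠ "" then result ++ "; " ++ number
      else result
    result
  else if pos = "DET" then
    let pronType := pvGetD (pvTrad "PronType") (pvGetD morfologia "PronType" "") (pvGetD morfologia "PronType" "")
    let definite := pvGetD (pvTrad "Definite") (pvGetD morfologia "Definite" "") (pvGetD morfologia "Definite" "")
    let gender := pvGetD (pvTrad "Gender") (pvGetD morfologia "Gender" "") (pvGetD morfologia "Gender" "")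
    let number := pvGetD (pvTrad "Number") (pvGetD morfologia "Number" "") (pvGetD morfologia "Number" "")
    let result := ""
    let result :=
      if pronType ≠ "" ∧ definite ≠ "" then result ++ pronType ++ " " ++ definite
      else if pronType ≠ "" then result ++ pronType
      else if definite ≠ "" then result ++ definite
      else result
    let result := if gender ≠ "" then result ++ "; " ++ gender else result
    let result := if number ≠ "" then result ++ "; " ++ number else result
    result
  else
    let order := ["VerbForm", "Mood", "Tense", "Number", "Gender", "Definite", "PronType", "Person", "Reflex"]
    let parts := order.foldl (fun parts key =>
      match morfologia.find? (fun p => p.1 == key) with  -- 'if key in morfologia' + 'morfologia[key]'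
      | some p => parts ++ [pvGetD (pvTrad key) p.2 p.2]
      | none => parts) ([] : List String)
    PySem.Str.join "; " parts

-- ===== PORT B =====
def simplificar_detalles_alt (morfologia : List (String × String)) (pos : String) : String :=
  let tr := fun (key : String) =>
    let v := pvGetD morfologia key ""
    pvGetD (pvTrad key) v v
  let assemble := fun (groups : List (List (String × Bool))) =>
    let out := (PySem.List.enumerate groups 0).foldl (fun (out : List String) (ig : Int × List (String × Bool)) =>
      let toks := ig.2.foldl (fun toks kb =>
        let t := tr kb.1
        if kb.2 = true ∨ t ≠ "" then toks ++ [t] else toks) ([] : List String)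
      if ig.1 = 0 ∨ toks ≠ [] then out ++ [PySem.Str.join " " toks] else out) ([] : List String)
    PySem.Str.join "; " out
  if pos = "VERB" ∨ pos = "AUX" then
    let groups : List (List (String × Bool)) :=
      [[("VerbForm", true), ("Mood", false)], [("Tense", false)], [("Person", false), ("Number", false)]]
    assemble groups
  else if pos = "DET" then
    let groups : List (List (String × Bool)) :=
      [[("PronType", false), ("Definite", false)], [("Gender", false)], [("Number", false)]]
    assemble groups
  else
    let order := ["VerbForm", "Mood", "Tense", "Number", "Gender", "Definite", "PronType", "Person", "Reflex"]
    PySem.Str.join "; " ((order.filter (fun k => (morfologia.find? (fun p => p.1 == k)).isSome)).map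
      (fun k => let v := pvGetD morfologia k ""  -- morfologia[k]; the filter guarantees the key is present
                pvGetD (pvTrad k) v v))

-- ===== PRECONDITION & SPEC =====
def Spec_simplificar_detalles (morfologia : List (String × String)) (pos : String) (out : String) : Prop := out = simplificar_detalles_alt morfologia pos
instance (morfologia : List (String × String)) (pos : String) (out : String) : Decidable (Spec_simplificar_detalles morfologia pos out) := by unfold Spec_simplificar_detalles; infer_instance

-- ===== CLAIM (what is proved, stated in full; the proofs are below) =====
def Claim_equal_simplificar_detalles : Prop := ∀ (morfologia : List (String × String)) (pos : String), Dom_simplificar_detalles morfologia pos → Spec_simplificar_detalles morfologia pos (simplificar_detalles morfologia pos)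

-- ===== LEMMAS AND PROOFS =====

theorem pvJoin0 (s : String) : PySem.Str.join s [] = "" := by
  simp [PySem.Str.join]

theorem pvJoin1 (s a : String) : PySem.Str.join s [a] = a := by
  simp [PySem.Str.join]

theorem pvJoin2 (s a b : String) : PySem.Str.join s [a, b] = a ++ s ++ b := by
  apply String.toList_inj.mp
  simp [PySem.Str.join, PySem.Chars.join_cons_cons, PySem.Chars.join_singleton]

theorem pvJoin3 (s a b c : String) : PySem.Str.join s [a, b, c] = a ++ s ++ b ++ s ++ c := by
  apply String.toList_inj.mp
  simp [PySem.Str.join, PySem.Chars.join_cons_cons, PySem.Chars.join_singleton]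

-- A's else-branch accumulator loop is a filter-then-map
theorem pvFoldFilterMap (m : List (String × String)) (ks : List String) (acc : List String) :
    ks.foldl (fun parts key =>
      match m.find? (fun p => p.1 == key) with
      | some p => parts ++ [pvGetD (pvTrad key) p.2 p.2]
      | none => parts) acc
    = acc ++ (ks.filter (fun k => (m.find? (fun p => p.1 == k)).isSome)).map
        (fun k => let v := pvGetD m k ""
                  pvGetD (pvTrad k) v v) := by
  induction ks generalizing acc with
  | nil => simp
  | cons k ks ih =>
    simp only [List.foldl_cons, List.filter_cons]
    cases h : m.find? (fun p => p.1 == k) with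
    | none => simp [ih]
    | some p =>
      have hg : pvGetD m k "" = p.2 := by simp [pvGetD, h]
      simp only [ih, List.cons_append, List.append_assoc, List.nil_append]
      simp [← hg]

-- ===== VERDICT (by name: the statement is the Claim_ definition above) =====
theorem simplificar_detalles_spec : Claim_equal_simplificar_detalles := by
  intro m pos _
  unfold Spec_simplificar_detalles simplificar_detalles simplificar_detalles_alt
  by_cases hv : pos = "VERB" ∨ pos = "AUX"
  · simp only [hv, if_true, PySem.List.enumerate_cons, PySem.List.enumerate_nil, List.foldl]
    by_cases hmood : pvGetD (pvTrad "Mood") (pvGetD m "Mood" "") (pvGetD m "Mood" "") ≠ "" <;>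
    by_cases htense : pvGetD (pvTrad "Tense") (pvGetD m "Tense" "") (pvGetD m "Tense" "") ≠ "" <;>
    by_cases hperson : pvGetD (pvTrad "Person") (pvGetD m "Person" "") (pvGetD m "Person" "") ≠ "" <;>
    by_cases hnumber : pvGetD (pvTrad "Number") (pvGetD m "Number" "") (pvGetD m "Number" "") ≠ "" <;>
    simp [hmood, htense, hperson, hnumber, pvJoin1, pvJoin2, pvJoin3, String.append_assoc]
  · by_cases hd : pos = "DET"
    · simp only [hd, if_true, PySem.List.enumerate_cons, PySem.List.enumerate_nil, List.foldl]
      by_cases hpron : pvGetD (pvTrad "PronType") (pvGetD m "PronType" "") (pvGetD m "PronType" "") ≠ "" <;>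
      by_cases hdef : pvGetD (pvTrad "Definite") (pvGetD m "Definite" "") (pvGetD m "Definite" "") ≠ "" <;>
      by_cases hgen : pvGetD (pvTrad "Gender") (pvGetD m "Gender" "") (pvGetD m "Gender" "") ≠ "" <;>
      by_cases hnum : pvGetD (pvTrad "Number") (pvGetD m "Number" "") (pvGetD m "Number" "") ≠ "" <;>
      simp [hpron, hdef, hgen, hnum, pvJoin0, pvJoin1, pvJoin2, pvJoin3, String.append_assoc]
    · simp only [hv, hd, if_false]
      rw [pvFoldFilterMap]
      simp
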